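-- pv_equiv track=rewrite | github.com/LiQingYan-coder/log2csv | log2csv/code/downFromTMcopy/downloadFromTMcopy.py | extract_info_and_replace_url
-- ===== SOURCE A (Python) =====
-- def extract_info_and_replace_url(processed_lines, mapping_dict):
--     timestamp_list = []
--     eid_list = []
--     site_name_list = []
--     url_list = []
--     final_url_list = []
--     for line in processed_lines:
--         elements = line.split(',')
--         timestamp = elements[0]
--         eid = elements[3]
--         site_name = elements[5]
--         timestamp_list.append(timestamp)
--         eid_list.append(eid)
--         site_name_list.append(site_name)
--         if site_name in mapping_dict:
--             url = mapping_dict[site_name]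
--             url = url.replace("TIME", timestamp).replace("EID", eid)
--             final_url_list.append(url)
--             url_list.append(url)
--         else:
--             url_list.append("N/A")
--             final_url_list.append("N/A")
--     return timestamp_list, eid_list, site_name_list, url_list, final_url_list
-- ===== SOURCE B (Python) =====
-- def extract_info_and_replace_url(processed_lines, mapping_dict):
--     if not processed_lines:
--         return [], [], [], [], []
--     # Transpose the parsed CSV matrix and slice whole columns instead of walking rows.
--     columns = list(zip(*(line.split(',') for line in processed_lines)))
--     timestamp_list = list(columns[0])
--     eid_list = list(columns[3])
--     site_name_list = list(columns[5])
--     url_list = [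
--         mapping_dict[s].replace("TIME", t).replace("EID", e) if s in mapping_dict else "N/A"
--         for t, e, s in zip(timestamp_list, eid_list, site_name_list)
--     ]
--     return timestamp_list, eid_list, site_name_list, url_list, url_list[:]
-- ===== Notes on version B (the rewrite author's own statement) =====
-- stated objective: alternative
-- what changed: B transposes the parsed CSV matrix with zip(*...) and slices whole columns (0/3/5), then builds the url list in one zip pass over the three columns, instead of A's single row-wise loop pushing onto five accumulator lists.
import Mathlib
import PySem

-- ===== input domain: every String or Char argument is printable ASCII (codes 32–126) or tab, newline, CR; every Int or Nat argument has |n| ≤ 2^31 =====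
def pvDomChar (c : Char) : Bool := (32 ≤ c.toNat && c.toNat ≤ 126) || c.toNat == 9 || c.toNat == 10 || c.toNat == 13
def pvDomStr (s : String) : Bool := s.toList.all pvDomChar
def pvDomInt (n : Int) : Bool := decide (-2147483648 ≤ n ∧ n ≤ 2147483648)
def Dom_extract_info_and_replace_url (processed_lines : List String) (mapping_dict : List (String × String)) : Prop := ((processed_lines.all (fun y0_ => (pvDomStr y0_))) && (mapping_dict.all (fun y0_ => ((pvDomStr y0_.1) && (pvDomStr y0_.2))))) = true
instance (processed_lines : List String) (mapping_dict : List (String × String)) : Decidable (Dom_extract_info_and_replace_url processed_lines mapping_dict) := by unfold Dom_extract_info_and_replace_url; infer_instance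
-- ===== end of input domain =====

-- B transposes the parsed CSV matrix (zip(*...)) and slices whole columns, then builds the
-- url list in one zip pass over the three columns; A walks the rows once pushing onto five
-- accumulator lists (objective: alternative algorithm, same cost).

-- ===== PORT A =====
-- A's single loop, carried as a foldl over the five accumulator lists. elements[0]/[3]/[5]
-- raise IndexError on short lines in Python; Pre_ excludes those, the port defaults to "".
def pvStepA (m : List (String × String)) (st : List String × List String × List String × List String × List String) (line : String) : List String × List String × List String × List String × List String :=
  let elements := (PySem.Str.split? line ",").getD []
  let timestamp := (PySem.List.pyGet? elements 0).getD ""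
  let eid := (PySem.List.pyGet? elements 3).getD ""
  let site_name := (PySem.List.pyGet? elements 5).getD ""
  match st with
  | (ts, es, ss, us, fs) =>
    match (PySem.Dict.mk m).get? site_name with
    | some u =>
      let url := PySem.Str.replace (PySem.Str.replace u "TIME" timestamp) "EID" eid
      (ts ++ [timestamp], es ++ [eid], ss ++ [site_name], us ++ [url], fs ++ [url])
    | none =>
      (ts ++ [timestamp], es ++ [eid], ss ++ [site_name], us ++ ["N/A"], fs ++ ["N/A"])

def extract_info_and_replace_url (processed_lines : List String) (mapping_dict : List (String × String)) : List String × List String × List String × List String × List String :=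
  processed_lines.foldl (pvStepA mapping_dict) ([], [], [], [], [])

-- ===== PORT B =====
-- Python's zip(*rows): truncates at the shortest row; exact transcription of B's transpose.
def pvZipStar (rows : List (List String)) : List (List String) :=
  if h : rows.isEmpty || rows.any (fun r => r.isEmpty) then []
  else (rows.map (fun r => r.headD "")) :: pvZipStar (rows.map (fun r => r.tail))
termination_by (rows.map List.length).sum
decreasing_by
  simp only [Bool.or_eq_true, List.any_eq_true, not_or] at h
  obtain ⟨hne, hall⟩ := h
  push Not at hall
  have key : ∀ (l : List (List String)), (∀ r ∈ l, ¬ r.isEmpty = true) →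
      (l.map (fun r => r.tail.length)).sum + l.length ≤ (l.map List.length).sum := by
    intro l hl
    induction l with
    | nil => simp
    | cons a t ih =>
      have ha := hl a (by simp)
      have : a.tail.length + 1 ≤ a.length := by
        cases a with
        | nil => simp at ha
        | cons x xs => simp
      have ht := ih (fun r hr => hl r (by simp [hr]))
      simp only [List.map_cons, List.sum_cons, List.length_cons]
      omega
  have hne' : rows ≠ [] := by
    intro hcon; subst hcon; simp at hne
  have hkey := key rows hall
  have hlen : 1 ≤ rows.length := by
    cases rows with
    | nil => exact absurd rfl hne'
    | cons a t => simp
  calc ((rows.attach.map (fun x => x.1.tail)).map List.length).sum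
      = (rows.map (fun r => r.tail.length)).sum := by
        simp [List.map_map, Function.comp_def, List.length_tail]
    _ < (rows.map List.length).sum := by omega

def extract_info_and_replace_url_alt (processed_lines : List String) (mapping_dict : List (String × String)) : List String × List String × List String × List String × List String :=
  if processed_lines.isEmpty then ([], [], [], [], [])
  else
    let columns := pvZipStar (processed_lines.map (fun line => (PySem.Str.split? line ",").getD []))
    let timestamp_list := (PySem.List.pyGet? columns 0).getD []
    let eid_list := (PySem.List.pyGet? columns 3).getD []
    let site_name_list := (PySem.List.pyGet? columns 5).getD []
    let url_list := (timestamp_list.zip (eid_list.zip site_name_list)).map (fun tes =>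
      match (PySem.Dict.mk mapping_dict).get? tes.2.2 with
      | some u => PySem.Str.replace (PySem.Str.replace u "TIME" tes.1) "EID" tes.2.1
      | none => "N/A")
    (timestamp_list, eid_list, site_name_list, url_list, url_list)

-- ===== PRECONDITION & SPEC =====
-- Pre_ excludes inputs where some line splits into fewer than 6 fields: Python A raises IndexError there.
def Pre_extract_info_and_replace_url (processed_lines : List String) (mapping_dict : List (String × String)) : Prop :=
  ∀ line ∈ processed_lines, 6 ≤ ((PySem.Str.split? line ",").getD []).length

instance (processed_lines : List String) (mapping_dict : List (String × String)) : Decidable (Pre_extract_info_and_replace_url processed_lines mapping_dict) := by unfold Pre_extract_info_and_replace_url; infer_instance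

def pvWitness_extract_info_and_replace_url : List String × (List (String × String)) :=
  (["t1,a,b,e1,c,siteA", "t2,a,b,e2,c,siteB"], [("siteA", "http://x/TIME/EID")])

def Spec_extract_info_and_replace_url (processed_lines : List String) (mapping_dict : List (String × String)) (out : List String × List String × List String × List String × List String) : Prop := out = extract_info_and_replace_url_alt processed_lines mapping_dict
instance (processed_lines : List String) (mapping_dict : List (String × String)) (out : List String × List String × List String × List String × List String) : Decidable (Spec_extract_info_and_replace_url processed_lines mapping_dict out) := by unfold Spec_extract_info_and_replace_url; infer_instance

-- ===== CLAIM (what is proved, stated in full; the proofs are below) =====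
def Claim_equal_extract_info_and_replace_url : Prop := ∀ (processed_lines : List String) (mapping_dict : List (String × String)), Dom_extract_info_and_replace_url processed_lines mapping_dict → Pre_extract_info_and_replace_url processed_lines mapping_dict → Spec_extract_info_and_replace_url processed_lines mapping_dict (extract_info_and_replace_url processed_lines mapping_dict)

-- ===== LEMMAS AND PROOFS =====
def pvGetS (p : List String) (i : Int) : String := (PySem.List.pyGet? p i).getD ""

def pvUrl (p : List String) (mapping_dict : List (String × String)) : String :=
  match (PySem.Dict.mk mapping_dict).get? (pvGetS p 5) with
  | some u => PySem.Str.replace (PySem.Str.replace u "TIME" (pvGetS p 0)) "EID" (pvGetS p 3)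
  | none => "N/A"

theorem pvFoldA_eq (m : List (String × String)) (pls : List String) (ts es ss us fs : List String) :
    pls.foldl (pvStepA m) (ts, es, ss, us, fs) =
      (ts ++ (pls.map (fun l => pvGetS ((PySem.Str.split? l ",").getD []) 0)),
       es ++ (pls.map (fun l => pvGetS ((PySem.Str.split? l ",").getD []) 3)),
       ss ++ (pls.map (fun l => pvGetS ((PySem.Str.split? l ",").getD []) 5)),
       us ++ (pls.map (fun l => pvUrl ((PySem.Str.split? l ",").getD []) m)),
       fs ++ (pls.map (fun l => pvUrl ((PySem.Str.split? l ",").getD []) m))) := by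
  induction pls generalizing ts es ss us fs with
  | nil => simp
  | cons l rest ih =>
    simp only [List.foldl_cons, List.map_cons]
    rw [show pvStepA m (ts, es, ss, us, fs) l =
        (ts ++ [pvGetS ((PySem.Str.split? l ",").getD []) 0],
         es ++ [pvGetS ((PySem.Str.split? l ",").getD []) 3],
         ss ++ [pvGetS ((PySem.Str.split? l ",").getD []) 5],
         us ++ [pvUrl ((PySem.Str.split? l ",").getD []) m],
         fs ++ [pvUrl ((PySem.Str.split? l ",").getD []) m]) from by
      simp only [pvStepA, pvUrl, pvGetS]
      cases (PySem.Dict.mk m).get? ((PySem.List.pyGet? ((PySem.Str.split? l ",").getD []) 5).getD "") <;> rfl]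
    rw [ih]
    simp

-- column j of the transpose is the map of the j-th field, when every row is long enough
theorem pvZipStar_get (j : Nat) (rows : List (List String)) (hne : rows ≠ [])
    (hall : ∀ r ∈ rows, j < r.length) :
    (pvZipStar rows)[j]? = some (rows.map (fun r => r.getD j "")) := by
  induction j generalizing rows with
  | zero =>
    rw [pvZipStar]
    rw [dif_neg (by
      simp only [Bool.or_eq_true, List.any_eq_true, not_or]
      push Not
      refine ⟨by simpa [List.isEmpty_iff] using hne, fun r hr => by
        have := hall r hr
        cases r with
        | nil => simp at this
        | cons a t => simp⟩)]
    simp only [List.getElem?_cons_zero, Option.some.injEq]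
    apply List.map_congr_left
    intro r hr
    have := hall r hr
    cases r with
    | nil => simp at this
    | cons a t => simp [List.headD, List.getD]
  | succ j ih =>
    rw [pvZipStar]
    rw [dif_neg (by
      simp only [Bool.or_eq_true, List.any_eq_true, not_or]
      push Not
      refine ⟨by simpa [List.isEmpty_iff] using hne, fun r hr => by
        have := hall r hr
        cases r with
        | nil => simp at this
        | cons a t => simp⟩)]
    simp only [List.getElem?_cons_succ]
    rw [ih (rows.map (fun r => r.tail))
        (by cases rows with | nil => exact absurd rfl hne | cons a t => simp)
        (by intro r hr
            simp only [List.mem_map] at hr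
            obtain ⟨y, hy, rfl⟩ := hr
            have := hall y hy
            cases y with
            | nil => simp at this
            | cons a t => simp at this ⊢; omega)]
    simp only [List.map_map, Option.some.injEq]
    apply List.map_congr_left
    intro r hr
    have := hall r hr
    cases r with
    | nil => simp at this
    | cons a t => simp [List.getD]

theorem pvGetS_natCast (p : List String) (j : Nat) : pvGetS p (j : Int) = p.getD j "" := by
  simp [pvGetS, PySem.List.pyGet?_natCast, List.getD_eq_getElem?_getD]

theorem pvGetS0 (p : List String) : pvGetS p 0 = p.getD 0 "" := pvGetS_natCast p 0
theorem pvGetS3 (p : List String) : pvGetS p 3 = p.getD 3 "" := pvGetS_natCast p 3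
theorem pvGetS5 (p : List String) : pvGetS p 5 = p.getD 5 "" := pvGetS_natCast p 5

-- ===== VERDICT (by name: the statement is the Claim_ definition above) =====
theorem extract_info_and_replace_url_spec : Claim_equal_extract_info_and_replace_url := by
  intro pls m _ hpre
  show extract_info_and_replace_url pls m = extract_info_and_replace_url_alt pls m
  cases hpls : pls with
  | nil => simp [extract_info_and_replace_url, extract_info_and_replace_url_alt]
  | cons l0 rest =>
    subst hpls
    rw [extract_info_and_replace_url, pvFoldA_eq, extract_info_and_replace_url_alt]
    rw [if_neg (by simp)]
    have hrows : ∀ r ∈ (l0 :: rest).map (fun line => (PySem.Str.split? line ",").getD []), ∀ j : Nat, j < 6 → j < r.length := by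
      intro r hr j hj
      simp only [List.mem_map] at hr
      obtain ⟨y, hy, rfl⟩ := hr
      have := hpre y hy
      omega
    have hcol : ∀ j : Nat, j < 6 →
        (PySem.List.pyGet? (pvZipStar ((l0 :: rest).map (fun line => (PySem.Str.split? line ",").getD []))) (j : Int)).getD []
          = (l0 :: rest).map (fun l => ((PySem.Str.split? l ",").getD []).getD j "") := by
      intro j hj
      rw [PySem.List.pyGet?_natCast, pvZipStar_get j _ (by simp) (fun r hr => hrows r hr j hj)]
      simp [List.map_map, Function.comp]
    simp only []
    rw [show ((0 : Int)) = ((0 : Nat) : Int) from rfl, show ((3 : Int)) = ((3 : Nat) : Int) from rfl,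
        show ((5 : Int)) = ((5 : Nat) : Int) from rfl]
    rw [hcol 0 (by norm_num), hcol 3 (by norm_num), hcol 5 (by norm_num)]
    rw [List.zip_map', List.zip_map', List.map_map]
    refine congrArg₂ _ ?_ (congrArg₂ _ ?_ (congrArg₂ _ ?_ (congrArg₂ _ ?_ ?_))) <;>
    · simp only [List.nil_append]
      apply List.map_congr_left
      intro l hl
      simp [pvUrl, pvGetS0, pvGetS3, pvGetS5, List.getD_eq_getElem?_getD]
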